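-- pv_equiv track=rewrite | github.com/fractaledmind/alfred_libgen | src/dev/progress.py | formatConsole
-- ===== SOURCE A (Python) =====
-- def formatConsole(string):
--     """Prepare for console."""
--     bannedChars = ['!', '?', '$', '%', '#',
--                    '&', '*', ';', '(', ')',
--                    '@', '`', '|', "'", '"',
--                    '~', '<', '>', ' ']
--     for i in bannedChars:
--         if i in string:
--             string = string.replace(i, r'\{}'.format(i))
--     return string
-- ===== SOURCE B (Python) =====
-- BANNED = frozenset('!?$%#&*;()@`|\'"~<> ')
--
--
-- def formatConsole(string):
--     """Prepare for console."""
--     return ''.join('\\' + c if c in BANNED else c for c in string)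
-- ===== Notes on version B (the rewrite author's own statement) =====
-- stated objective: idiomatic
-- what changed: Replaced 19 sequential whole-string str.replace scans (one per banned character) with a single left-to-right pass over the input that joins '\'+c for banned characters, valid because the backslash prefix never creates a new banned character.
import Mathlib
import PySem

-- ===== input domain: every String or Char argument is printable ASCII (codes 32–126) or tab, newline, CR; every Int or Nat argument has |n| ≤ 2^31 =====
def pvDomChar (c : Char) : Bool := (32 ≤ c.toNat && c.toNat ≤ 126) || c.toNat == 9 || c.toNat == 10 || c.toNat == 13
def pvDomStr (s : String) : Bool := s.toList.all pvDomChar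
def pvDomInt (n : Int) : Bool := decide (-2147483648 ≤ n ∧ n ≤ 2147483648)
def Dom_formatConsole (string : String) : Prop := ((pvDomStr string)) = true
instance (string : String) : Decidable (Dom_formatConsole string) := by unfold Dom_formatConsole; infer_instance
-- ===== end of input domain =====

-- B escapes the 19 banned characters in ONE pass over the input (join of a generator) instead of
-- A's 19 whole-string replace scans; return value only, A rebinds its parameter locally (no visible mutation).

-- ===== PORT A =====
def pvBannedChars : List Char :=
  ['!', '?', '$', '%', '#', '&', '*', ';', '(', ')', '@', '`', '|', '\'', '"', '~', '<', '>', ' ']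

def formatConsole (string : String) : String :=
  pvBannedChars.foldl (fun s i =>
    if PySem.Str.isIn (String.ofList [i]) s
    then PySem.Str.replace s (String.ofList [i]) (String.ofList ['\\', i])
    else s) string

-- ===== PORT B =====
def pvBannedSet : PySem.Set Char := PySem.Set.ofList "!?$%#&*;()@`|'\"~<> ".toList

def formatConsole_alt (string : String) : String :=
  String.ofList (string.toList.flatMap (fun c =>
    if pvBannedSet.contains c then '\\' :: [c] else [c]))

-- ===== PRECONDITION & SPEC =====
def Spec_formatConsole (string : String) (out : String) : Prop := out = formatConsole_alt string
instance (string : String) (out : String) : Decidable (Spec_formatConsole string out) := by unfold Spec_formatConsole; infer_instance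

-- ===== CLAIM (what is proved, stated in full; the proofs are below) =====
def Claim_equal_formatConsole : Prop := ∀ (string : String), Dom_formatConsole string → Spec_formatConsole string (formatConsole string)

-- ===== LEMMAS AND PROOFS =====

-- str.replace with a one-character pattern, characterised via its fuelled worker.
lemma pvReplace_go_single (b : Char) (new : List Char) : ∀ (fuel : Nat) (s acc : List Char),
    s.length ≤ fuel →
    PySem.Chars.replace.go [b] new fuel s acc
      = acc.reverse ++ s.flatMap (fun c => if c = b then new else [c]) := by
  intro fuel
  induction fuel with
  | zero => intro s acc h; simp at h; subst h; simp [PySem.Chars.replace.go]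
  | succ n ih =>
    intro s acc h
    cases s with
    | nil => simp [PySem.Chars.replace.go]
    | cons c t =>
      by_cases hc : c = b
      · subst hc
        simp only [PySem.Chars.replace.go, List.isPrefixOf, BEq.rfl, Bool.true_and, if_true]
        simp only [List.length_nil, List.drop_zero, List.length_cons, List.drop_succ_cons]
        rw [ih t (new.reverse ++ acc) (by simpa using h)]
        simp
      · simp only [PySem.Chars.replace.go, List.isPrefixOf, Bool.and_true]
        rw [if_neg (by simp [Ne.symm hc]), ih t (c :: acc) (by simpa using h)]
        simp [hc]

lemma pvReplace_single (b : Char) (new : List Char) (s : List Char) :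
    PySem.Chars.replace s [b] new = s.flatMap (fun c => if c = b then new else [c]) := by
  rw [PySem.Chars.replace, if_neg (by simp)]
  simpa using pvReplace_go_single b new s.length s [] le_rfl

-- One step of A's loop, on the character-list side (the `i in string` guard is redundant:
-- replacing an absent character is the identity).
lemma pvStep_toList (s : String) (i : Char) :
    (if PySem.Str.isIn (String.ofList [i]) s
     then PySem.Str.replace s (String.ofList [i]) (String.ofList ['\\', i])
     else s).toList
      = s.toList.flatMap (fun c => if c = i then ['\\', i] else [c]) := by
  by_cases h : PySem.Str.isIn (String.ofList [i]) s = true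
  · rw [if_pos h]
    simp only [PySem.Str.toList_replace, String.toList_ofList]
    exact pvReplace_single i ['\\', i] s.toList
  · rw [if_neg h]
    have hni : i ∉ s.toList := by
      intro hmem
      have : PySem.Chars.isIn [i] s.toList = false := by
        have := PySem.Str.isIn_eq (String.ofList [i]) s
        simp only [String.toList_ofList] at this
        rw [← this]; exact Bool.not_eq_true _ ▸ (by simpa using h)
      exact (PySem.Chars.isIn_eq_false_iff _ _).mp this ((List.singleton_infix_iff i s.toList).mpr hmem)
    calc s.toList = s.toList.flatMap (fun c => [c]) := (List.flatMap_singleton' _).symm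
      _ = _ := List.flatMap_congr (fun a ha =>
            (if_neg (fun hab : a = i => hni (by rw [← hab]; exact ha))).symm)

-- A's whole foldl over Strings, moved to the character-list side.
lemma pvFoldl_toList : ∀ (L : List Char) (s : String),
    (L.foldl (fun s i =>
      if PySem.Str.isIn (String.ofList [i]) s
      then PySem.Str.replace s (String.ofList [i]) (String.ofList ['\\', i])
      else s) s).toList
      = L.foldl (fun l i => l.flatMap (fun c => if c = i then ['\\', i] else [c])) s.toList := by
  intro L
  induction L with
  | nil => intro s; rfl
  | cons b L ih =>
    intro s
    simp only [List.foldl_cons]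
    rw [show (L.foldl (fun l i => l.flatMap fun c => if c = i then ['\\', i] else [c])
          (s.toList.flatMap fun c => if c = b then ['\\', b] else [c]))
        = L.foldl (fun l i => l.flatMap fun c => if c = i then ['\\', i] else [c])
          ((if PySem.Str.isIn (String.ofList [b]) s
            then PySem.Str.replace s (String.ofList [b]) (String.ofList ['\\', b]) else s).toList)
        from by rw [pvStep_toList]]
    exact ih _

-- The sequence of single-character replacements equals one escaping pass, because '\' is never
-- banned and each banned character is replaced exactly once.
lemma pvEscape_foldl : ∀ (L : List Char), '\\' ∉ L → L.Nodup → ∀ (l : List Char),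
    L.foldl (fun l i => l.flatMap (fun c => if c = i then ['\\', i] else [c])) l
      = l.flatMap (fun c => if L.contains c then ['\\', c] else [c]) := by
  intro L
  induction L with
  | nil => intro _ _ l; simp
  | cons b L ih =>
    intro hbs hnd l
    have hbsL : '\\' ∉ L := fun h => hbs (List.mem_cons_of_mem _ h)
    have hbL : b ∉ L := (List.nodup_cons.mp hnd).1
    have hndL : L.Nodup := (List.nodup_cons.mp hnd).2
    simp only [List.foldl_cons]
    rw [ih hbsL hndL, List.flatMap_assoc]
    refine List.flatMap_congr (fun c _ => ?_)
    by_cases hc : c = b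
    · subst hc
      simp [hbsL, hbL]
    · simp only [if_neg hc, List.flatMap_cons, List.flatMap_nil, List.append_nil,
        List.contains_cons]
      rw [show (c == b) = false by simpa using hc]
      simp

-- ===== VERDICT (by name: the statement is the Claim_ definition above) =====
theorem formatConsole_spec : Claim_equal_formatConsole := by
  intro s _
  unfold Spec_formatConsole formatConsole formatConsole_alt
  apply String.toList_inj.mp
  rw [pvFoldl_toList, pvEscape_foldl pvBannedChars (by decide) (by decide), String.toList_ofList]
  refine List.flatMap_congr (fun c _ => ?_)
  rw [show pvBannedSet = pvBannedChars from by decide]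
  simp [PySem.Set.contains]
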